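-- pv_equiv track=rewrite | github.com/bentalcy/deer-rtg | scripts/enrollment_ui.py | _build_cluster_suggestions
-- ===== SOURCE A (Python) =====
-- def _build_cluster_suggestions(
--     cluster_rows: list[tuple[str, str]],
--     deer_by_basename: dict[str, str],
-- ) -> tuple[dict[str, str], dict[str, str]]:
--     fallback_by_name: dict[str, str] = {}
--     names_by_cluster: dict[str, dict[str, int]] = {}
--
--     for basename, cluster_id in cluster_rows:
--         fallback_by_name[basename] = f"cluster-{cluster_id}"
--         deer_id = deer_by_basename.get(basename)
--         if not deer_id:
--             continue
--         cluster_map = names_by_cluster.setdefault(cluster_id, {})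
--         cluster_map[deer_id] = cluster_map.get(deer_id, 0) + 1
--
--     cluster_winner: dict[str, str] = {}
--     for cluster_id, counts in names_by_cluster.items():
--         if not counts:
--             continue
--         ranked = sorted(counts.items(), key=lambda kv: (-kv[1], kv[0].lower()))
--         if len(ranked) > 1 and ranked[0][1] == ranked[1][1]:
--             continue
--         cluster_winner[cluster_id] = ranked[0][0]
--
--     preferred_by_name: dict[str, str] = {}
--     for basename, cluster_id in cluster_rows:
--         winner = cluster_winner.get(cluster_id)
--         if winner:
--             preferred_by_name[basename] = winner
--
--     return preferred_by_name, fallback_by_name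
-- ===== SOURCE B (Python) =====
-- def _build_cluster_suggestions(
--     cluster_rows: list[tuple[str, str]],
--     deer_by_basename: dict[str, str],
-- ) -> tuple[dict[str, str], dict[str, str]]:
--     fallback_by_name: dict[str, str] = {}
--     tally: dict[tuple[str, str], int] = {}
--     # cluster_id -> (max count, holder of the max, is the max unique)
--     best: dict[str, tuple[int, str, bool]] = {}
--
--     for basename, cluster_id in cluster_rows:
--         fallback_by_name[basename] = f"cluster-{cluster_id}"
--         deer_id = deer_by_basename.get(basename)
--         if not deer_id:
--             continue
--         n = tally.get((cluster_id, deer_id), 0) + 1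
--         tally[(cluster_id, deer_id)] = n
--         b = best.get(cluster_id)
--         if b is None or n > b[0]:
--             best[cluster_id] = (n, deer_id, True)
--         elif n == b[0]:
--             best[cluster_id] = (n, b[1], False)
--
--     preferred_by_name: dict[str, str] = {}
--     for basename, cluster_id in cluster_rows:
--         b = best.get(cluster_id)
--         if b is not None and b[2]:
--             preferred_by_name[basename] = b[1]
--
--     return preferred_by_name, fallback_by_name
-- ===== Notes on version B (the rewrite author's own statement) =====
-- stated objective: alternative
-- what changed: Replaces the per-cluster counts dicts plus a per-cluster sort of (count, lowercased id) with a flat (cluster, id) tally and a single-pass running argmax per cluster (max count, its holder, uniqueness flag), so no per-cluster dict and no sorting is needed.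
import Mathlib
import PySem

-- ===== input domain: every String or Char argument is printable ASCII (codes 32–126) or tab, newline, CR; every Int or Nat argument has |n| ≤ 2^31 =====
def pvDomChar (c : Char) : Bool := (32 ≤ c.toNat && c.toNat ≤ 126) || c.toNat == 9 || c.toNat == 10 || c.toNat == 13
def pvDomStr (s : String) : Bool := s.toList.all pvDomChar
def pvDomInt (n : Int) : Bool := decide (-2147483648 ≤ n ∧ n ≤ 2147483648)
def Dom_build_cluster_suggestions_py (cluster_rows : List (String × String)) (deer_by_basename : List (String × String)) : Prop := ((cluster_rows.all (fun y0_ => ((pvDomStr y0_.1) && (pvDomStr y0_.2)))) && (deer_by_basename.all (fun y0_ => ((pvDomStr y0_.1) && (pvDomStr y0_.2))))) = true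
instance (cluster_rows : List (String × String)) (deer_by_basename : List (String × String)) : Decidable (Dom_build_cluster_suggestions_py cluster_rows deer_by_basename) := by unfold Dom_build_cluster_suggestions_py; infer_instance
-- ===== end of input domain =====

-- B replaces A's per-cluster sort of the deer-id counts by a single-pass running
-- argmax per cluster (max count, its holder, uniqueness flag): a sort-free alternative.

-- ===== PORT A =====
-- A's sort key: (-count, name.lower()), compared as a Python tuple (lexicographically)
def pvAKey (kv : String × Int) : Int ×ₗ String := toLex (-kv.2, PySem.Str.lower kv.1)

def build_cluster_suggestions_py (cluster_rows : List (String × String)) (deer_by_basename : List (String × String)) : (List (String × String)) × (List (String × String)) :=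
  let st := cluster_rows.foldl
    (fun (st : PySem.Dict String String × PySem.Dict String (PySem.Dict String Int)) row =>
      let fb := st.1.insert row.1 ("cluster-" ++ row.2)
      match List.lookup row.1 deer_by_basename with
      | none => (fb, st.2)
      | some deer_id =>
        if deer_id = "" then (fb, st.2)
        else
          let cm := st.2.getD row.2 PySem.Dict.empty
          (fb, st.2.insert row.2 (cm.insert deer_id (cm.getD deer_id 0 + 1))))
    (PySem.Dict.empty, PySem.Dict.empty)
  let cluster_winner := st.2.items.foldl
    (fun (cw : PySem.Dict String String) (p : String × PySem.Dict String Int) =>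
      match PySem.List.sorted p.2.items pvAKey with
      | [] => cw
      | r0 :: rest =>
        match rest with
        | r1 :: _ => if r0.2 = r1.2 then cw else cw.insert p.1 r0.1
        | [] => cw.insert p.1 r0.1)
    PySem.Dict.empty
  let preferred := cluster_rows.foldl
    (fun (pf : PySem.Dict String String) row =>
      match cluster_winner.get? row.2 with
      | some w => if w = "" then pf else pf.insert row.1 w
      | none => pf)
    PySem.Dict.empty
  (preferred.items, st.1.items)

-- ===== PORT B =====
def build_cluster_suggestions_py_alt (cluster_rows : List (String × String)) (deer_by_basename : List (String × String)) : (List (String × String)) × (List (String × String)) :=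
  let st := cluster_rows.foldl
    (fun (st : PySem.Dict String String × PySem.Dict (String × String) Int × PySem.Dict String (Int × String × Bool)) row =>
      let fb := st.1.insert row.1 ("cluster-" ++ row.2)
      match List.lookup row.1 deer_by_basename with
      | none => (fb, st.2.1, st.2.2)
      | some deer_id =>
        if deer_id = "" then (fb, st.2.1, st.2.2)
        else
          let n := st.2.1.getD (row.2, deer_id) 0 + 1
          let tally := st.2.1.insert (row.2, deer_id) n
          let best :=
            match st.2.2.get? row.2 with
            | none => st.2.2.insert row.2 (n, deer_id, true)
            | some b =>
              if n > b.1 then st.2.2.insert row.2 (n, deer_id, true)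
              else if n = b.1 then st.2.2.insert row.2 (n, b.2.1, false)
              else st.2.2
          (fb, tally, best))
    (PySem.Dict.empty, PySem.Dict.empty, PySem.Dict.empty)
  let preferred := cluster_rows.foldl
    (fun (pf : PySem.Dict String String) row =>
      match st.2.2.get? row.2 with
      | some b => if b.2.2 then pf.insert row.1 b.2.1 else pf
      | none => pf)
    PySem.Dict.empty
  (preferred.items, st.1.items)

-- ===== PRECONDITION & SPEC =====
def Spec_build_cluster_suggestions_py (cluster_rows : List (String × String)) (deer_by_basename : List (String × String)) (out : (List (String × String)) × (List (String × String))) : Prop := out = build_cluster_suggestions_py_alt cluster_rows deer_by_basename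
instance (cluster_rows : List (String × String)) (deer_by_basename : List (String × String)) (out : (List (String × String)) × (List (String × String))) : Decidable (Spec_build_cluster_suggestions_py cluster_rows deer_by_basename out) := by unfold Spec_build_cluster_suggestions_py; infer_instance

-- ===== CLAIM (what is proved, stated in full; the proofs are below) =====
def Claim_equal_build_cluster_suggestions_py : Prop := ∀ (cluster_rows : List (String × String)) (deer_by_basename : List (String × String)), Dom_build_cluster_suggestions_py cluster_rows deer_by_basename → Spec_build_cluster_suggestions_py cluster_rows deer_by_basename (build_cluster_suggestions_py cluster_rows deer_by_basename)

-- ===== LEMMAS AND PROOFS =====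

-- named copies of the loop bodies of the two ports (definitionally equal to the inline lambdas)
def pvStepA (dbb : List (String × String))
    (st : PySem.Dict String String × PySem.Dict String (PySem.Dict String Int))
    (row : String × String) :
    PySem.Dict String String × PySem.Dict String (PySem.Dict String Int) :=
  let fb := st.1.insert row.1 ("cluster-" ++ row.2)
  match List.lookup row.1 dbb with
  | none => (fb, st.2)
  | some deer_id =>
    if deer_id = "" then (fb, st.2)
    else
      let cm := st.2.getD row.2 PySem.Dict.empty
      (fb, st.2.insert row.2 (cm.insert deer_id (cm.getD deer_id 0 + 1)))

def pvStepB (dbb : List (String × String))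
    (st : PySem.Dict String String × PySem.Dict (String × String) Int × PySem.Dict String (Int × String × Bool))
    (row : String × String) :
    PySem.Dict String String × PySem.Dict (String × String) Int × PySem.Dict String (Int × String × Bool) :=
  let fb := st.1.insert row.1 ("cluster-" ++ row.2)
  match List.lookup row.1 dbb with
  | none => (fb, st.2.1, st.2.2)
  | some deer_id =>
    if deer_id = "" then (fb, st.2.1, st.2.2)
    else
      let n := st.2.1.getD (row.2, deer_id) 0 + 1
      let tally := st.2.1.insert (row.2, deer_id) n
      let best :=
        match st.2.2.get? row.2 with
        | none => st.2.2.insert row.2 (n, deer_id, true)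
        | some b =>
          if n > b.1 then st.2.2.insert row.2 (n, deer_id, true)
          else if n = b.1 then st.2.2.insert row.2 (n, b.2.1, false)
          else st.2.2
      (fb, tally, best)

def pvStepCW (cw : PySem.Dict String String) (p : String × PySem.Dict String Int) : PySem.Dict String String :=
  match PySem.List.sorted p.2.items pvAKey with
  | [] => cw
  | r0 :: rest =>
    match rest with
    | r1 :: _ => if r0.2 = r1.2 then cw else cw.insert p.1 r0.1
    | [] => cw.insert p.1 r0.1

def pvStepPfA (cw : PySem.Dict String String) (pf : PySem.Dict String String) (row : String × String) : PySem.Dict String String :=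
  match cw.get? row.2 with
  | some w => if w = "" then pf else pf.insert row.1 w
  | none => pf

def pvStepPfB (best : PySem.Dict String (Int × String × Bool)) (pf : PySem.Dict String String) (row : String × String) : PySem.Dict String String :=
  match best.get? row.2 with
  | some b => if b.2.2 then pf.insert row.1 b.2.1 else pf
  | none => pf

-- A's winner selection for one cluster's counts dict
def pvSelA (m : PySem.Dict String Int) : Option String :=
  match PySem.List.sorted m.items pvAKey with
  | [] => none
  | [r0] => some r0.1
  | r0 :: r1 :: _ => if r0.2 = r1.2 then none else some r0.1

-- B's winner selection from a best-entry
def pvWinB (ob : Option (Int × String × Bool)) : Option String :=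
  match ob with
  | some (_, w, true) => some w
  | _ => none

-- the running-argmax state (n, w, u) correctly describes the counts dict m
def pvMState (m : PySem.Dict String Int) (n : Int) (w : String) (u : Bool) : Prop :=
  m.keys.Nodup ∧ m.items ≠ [] ∧
  (∀ p ∈ m.items, 1 ≤ p.2 ∧ p.1 ≠ "") ∧
  (∀ p ∈ m.items, p.2 ≤ n) ∧
  (if u then ((w, n) ∈ m.items ∧ ∀ p ∈ m.items, p.2 = n → p.1 = w)
   else ∃ p ∈ m.items, ∃ q ∈ m.items, p.1 ≠ q.1 ∧ p.2 = n ∧ q.2 = n)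

def pvRel (om : Option (PySem.Dict String Int)) (ob : Option (Int × String × Bool)) : Prop :=
  match om, ob with
  | none, none => True
  | some m, some (n, w, u) => pvMState m n w u
  | _, _ => False

def pvInv (nbc : PySem.Dict String (PySem.Dict String Int))
    (tally : PySem.Dict (String × String) Int)
    (best : PySem.Dict String (Int × String × Bool)) : Prop :=
  nbc.keys.Nodup ∧
  (∀ c d, tally.getD (c, d) 0 = (nbc.getD c PySem.Dict.empty).getD d 0) ∧
  (∀ c, pvRel (nbc.get? c) (best.get? c))

lemma pvPortA_eq (rows dbb : List (String × String)) :
    build_cluster_suggestions_py rows dbb =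
      (let st := rows.foldl (pvStepA dbb) (PySem.Dict.empty, PySem.Dict.empty)
       let cw := st.2.items.foldl pvStepCW PySem.Dict.empty
       ((rows.foldl (pvStepPfA cw) PySem.Dict.empty).items, st.1.items)) := rfl

lemma pvPortB_eq (rows dbb : List (String × String)) :
    build_cluster_suggestions_py_alt rows dbb =
      (let st := rows.foldl (pvStepB dbb) (PySem.Dict.empty, PySem.Dict.empty, PySem.Dict.empty)
       ((rows.foldl (pvStepPfB st.2.2) PySem.Dict.empty).items, st.1.items)) := rfl

lemma pvStepCW_eq (cw : PySem.Dict String String) (p : String × PySem.Dict String Int) :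
    pvStepCW cw p = match pvSelA p.2 with
      | some w => cw.insert p.1 w
      | none => cw := by
  unfold pvStepCW pvSelA
  rcases PySem.List.sorted p.2.items pvAKey with _ | ⟨r0, _ | ⟨r1, t⟩⟩ <;> simp <;> split <;> rfl

lemma pvAKey_le (r p : String × Int) (h : pvAKey r ≤ pvAKey p) : p.2 ≤ r.2 := by
  unfold pvAKey at h
  rcases Prod.Lex.le_iff.mp h with h1 | ⟨h1, _⟩ <;> simp at h1 <;> omega

lemma pvSelA_eq (m : PySem.Dict String Int) (n : Int) (w : String) (u : Bool)
    (h : pvMState m n w u) : pvSelA m = if u then some w else none := by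
  obtain ⟨hnd, hne, hpos, hbd, hu⟩ := h
  have hperm : (PySem.List.sorted m.items pvAKey).Perm m.items :=
    PySem.List.sorted_perm m.items pvAKey false
  have hmem : ∀ x, x ∈ PySem.List.sorted m.items pvAKey ↔ x ∈ m.items :=
    fun x => PySem.List.mem_sorted m.items pvAKey false x
  have hnodup : ((PySem.List.sorted m.items pvAKey).map Prod.fst).Nodup :=
    ((hperm.map Prod.fst).nodup_iff).mpr hnd
  have hex : ∃ p ∈ m.items, p.2 = n := by
    cases u with
    | true =>
      have hut : (w, n) ∈ m.items ∧ ∀ p ∈ m.items, p.2 = n → p.1 = w := by simpa using hu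
      exact ⟨(w, n), hut.1, rfl⟩
    | false =>
      obtain ⟨p, hp, _, _, _, hpn, _⟩ := (by simpa using hu :
        ∃ p ∈ m.items, ∃ q ∈ m.items, p.1 ≠ q.1 ∧ p.2 = n ∧ q.2 = n)
      exact ⟨p, hp, hpn⟩
  have hpair := PySem.List.sorted_pairwise m.items pvAKey
  rcases hrk : PySem.List.sorted m.items pvAKey with _ | ⟨r0, _ | ⟨r1, t2⟩⟩
  · exact absurd ((PySem.List.sorted_eq_nil_iff m.items pvAKey false).mp hrk) hne
  · -- a single ranked element: the counts dict is a singleton, so the max is unique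
    have hitems : m.items = [r0] := List.perm_singleton.mp (hrk ▸ hperm).symm
    have hr0mem : r0 ∈ m.items := by rw [hitems]; exact List.mem_singleton_self r0
    have hr0n : r0.2 = n := le_antisymm (hbd r0 hr0mem) (by
      obtain ⟨p, hp, hpn⟩ := hex
      rw [hitems] at hp
      simp only [List.mem_singleton] at hp
      rw [← hpn, hp])
    cases u with
    | true =>
      have := (by simpa using hu : (w, n) ∈ m.items ∧ ∀ p ∈ m.items, p.2 = n → p.1 = w)
      simp [pvSelA, hrk, this.2 r0 hr0mem hr0n]
    | false =>
      obtain ⟨p, hp, q, hq, hpq, _, _⟩ := (by simpa using hu :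
        ∃ p ∈ m.items, ∃ q ∈ m.items, p.1 ≠ q.1 ∧ p.2 = n ∧ q.2 = n)
      rw [hitems] at hp hq
      simp only [List.mem_singleton] at hp hq
      exact absurd (hp ▸ hq ▸ rfl) hpq
  · -- at least two ranked elements
    have hhead : ∀ y ∈ m.items, pvAKey r0 ≤ pvAKey y :=
      PySem.List.key_head_sorted_le m.items pvAKey hrk
    have hr0mem : r0 ∈ m.items := (hmem r0).mp (by rw [hrk]; exact List.mem_cons_self ..)
    have hr1mem : r1 ∈ m.items := (hmem r1).mp (by rw [hrk]; simp)
    have hr0n : r0.2 = n := le_antisymm (hbd r0 hr0mem) (by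
      obtain ⟨p, hp, hpn⟩ := hex
      rw [← hpn]; exact pvAKey_le r0 p (hhead p hp))
    rw [hrk] at hpair hnodup
    obtain ⟨h0all, hp1⟩ := List.pairwise_cons.mp hpair
    obtain ⟨h1all, _⟩ := List.pairwise_cons.mp hp1
    have hr01 : r0.1 ≠ r1.1 := by
      simp only [List.map_cons, List.nodup_cons, List.mem_cons, List.mem_map] at hnodup
      exact fun hq => hnodup.1 (Or.inl hq)
    by_cases htie : r0.2 = r1.2
    · -- the top count is shared: A skips, and u must be false
      cases u with
      | false => simp [pvSelA, hrk, htie]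
      | true =>
        have hut := (by simpa using hu : (w, n) ∈ m.items ∧ ∀ p ∈ m.items, p.2 = n → p.1 = w)
        have e0 : r0.1 = w := hut.2 r0 hr0mem hr0n
        have e1 : r1.1 = w := hut.2 r1 hr1mem (by omega)
        exact absurd (e0.trans e1.symm) hr01
    · -- a strict winner: u must be true and it is r0
      cases u with
      | true =>
        have hut := (by simpa using hu : (w, n) ∈ m.items ∧ ∀ p ∈ m.items, p.2 = n → p.1 = w)
        simp [pvSelA, hrk, htie, hut.2 r0 hr0mem hr0n]
      | false =>
        obtain ⟨p, hp, q, hq, hpq, hpn, hqn⟩ := (by simpa using hu :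
          ∃ p ∈ m.items, ∃ q ∈ m.items, p.1 ≠ q.1 ∧ p.2 = n ∧ q.2 = n)
        -- one of p, q has a key different from r0's
        obtain ⟨z, hz, hzn, hz0⟩ : ∃ z ∈ m.items, z.2 = n ∧ z.1 ≠ r0.1 := by
          by_cases hp0 : p.1 = r0.1
          · exact ⟨q, hq, hqn, fun hq0 => hpq (hp0.trans hq0.symm)⟩
          · exact ⟨p, hp, hpn, hp0⟩
        have hzr : z ∈ r0 :: r1 :: t2 := by rw [← hrk]; exact (hmem z).mpr hz
        have hzne : z ≠ r0 := fun hzr0 => hz0 (by rw [hzr0])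
        have hr1n : r1.2 = n := by
          rcases List.mem_cons.mp hzr with hzr0 | hzr'
          · exact absurd hzr0 hzne
          rcases List.mem_cons.mp hzr' with hzr1 | hzt
          · rw [← hzr1]; exact hzn
          · have := pvAKey_le r1 z (h1all z hzt)
            have := hbd r1 hr1mem
            omega
        exact absurd (by omega : r0.2 = r1.2) htie

lemma pvGetD_cases (m : PySem.Dict String Int) (d : String) :
    m.getD d 0 = 0 ∨ (d, m.getD d 0) ∈ m.items := by
  rw [PySem.Dict.getD_eq_get?_getD]
  cases h : m.get? d with
  | none => left; rfl
  | some v => right; simpa using PySem.Dict.mem_items_of_get?_eq_some m h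

lemma pvGetD_nonneg (m : PySem.Dict String Int)
    (hpos : ∀ p ∈ m.items, 1 ≤ p.2 ∧ p.1 ≠ "") (d : String) : 0 ≤ m.getD d 0 := by
  rcases pvGetD_cases m d with h | h
  · omega
  · have := (hpos _ h).1; omega

lemma pvKeyVal (m : PySem.Dict String Int) (hnd : m.keys.Nodup) {p : String × Int}
    (hp : p ∈ m.items) (d : String) (hpd : p.1 = d) : p.2 = m.getD d 0 := by
  have hmem : (d, p.2) ∈ m.items := by rw [← hpd]; exact hp
  exact (PySem.Dict.getD_of_mem_items m hmem hnd 0).symm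

-- the three transitions of the running argmax
lemma pvMS_new (m : PySem.Dict String Int) (n₀ : Int) (deer : String)
    (hnd : m.keys.Nodup) (hpos : ∀ p ∈ m.items, 1 ≤ p.2 ∧ p.1 ≠ "")
    (hbd : ∀ p ∈ m.items, p.2 ≤ n₀) (hd : deer ≠ "")
    (hgt : n₀ < m.getD deer 0 + 1) :
    pvMState (m.insert deer (m.getD deer 0 + 1)) (m.getD deer 0 + 1) deer true := by
  have hk0 : 0 ≤ m.getD deer 0 := pvGetD_nonneg m hpos deer
  refine ⟨PySem.Dict.nodup_keys_insert m deer _ hnd, ?_, ?_, ?_, ?_⟩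
  · intro hnil
    have := PySem.Dict.mem_items_insert_self m deer (m.getD deer 0 + 1)
    rw [hnil] at this
    exact absurd this (List.not_mem_nil)
  · intro p hp
    rcases (PySem.Dict.mem_items_insert m deer _ p).mp hp with hpn | ⟨hpo, _⟩
    · rw [hpn]; exact ⟨by omega, hd⟩
    · exact hpos p hpo
  · intro p hp
    rcases (PySem.Dict.mem_items_insert m deer _ p).mp hp with hpn | ⟨hpo, _⟩
    · rw [hpn]
    · have := hbd p hpo; omega
  · rw [if_pos rfl]
    refine ⟨PySem.Dict.mem_items_insert_self m deer _, ?_⟩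
    intro p hp hpn
    rcases (PySem.Dict.mem_items_insert m deer _ p).mp hp with hpn' | ⟨hpo, _⟩
    · rw [hpn']
    · have := hbd p hpo; omega

lemma pvMS_tie (m : PySem.Dict String Int) (n₀ : Int) (w₀ : String) (u₀ : Bool) (deer : String)
    (hms : pvMState m n₀ w₀ u₀) (hd : deer ≠ "")
    (heq : m.getD deer 0 + 1 = n₀) :
    pvMState (m.insert deer (m.getD deer 0 + 1)) n₀ w₀ false := by
  obtain ⟨hnd, hne, hpos, hbd, hu⟩ := hms
  -- an old element with the max count whose key is not deer
  obtain ⟨z, hz, hzn, hz1⟩ : ∃ z ∈ m.items, z.2 = n₀ ∧ z.1 ≠ deer := by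
    cases u₀ with
    | true =>
      have hut : (w₀, n₀) ∈ m.items ∧ ∀ p ∈ m.items, p.2 = n₀ → p.1 = w₀ := by simpa using hu
      refine ⟨(w₀, n₀), hut.1, rfl, fun hwd => ?_⟩
      have := pvKeyVal m hnd hut.1 deer hwd
      simp at this; omega
    | false =>
      obtain ⟨p, hp, q, hq, hpq, hpn, hqn⟩ := (by simpa using hu :
        ∃ p ∈ m.items, ∃ q ∈ m.items, p.1 ≠ q.1 ∧ p.2 = n₀ ∧ q.2 = n₀)
      refine ⟨p, hp, hpn, fun hpd => ?_⟩
      have := pvKeyVal m hnd hp deer hpd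
      omega
  refine ⟨PySem.Dict.nodup_keys_insert m deer _ hnd, ?_, ?_, ?_, ?_⟩
  · intro hnil
    have := PySem.Dict.mem_items_insert_self m deer (m.getD deer 0 + 1)
    rw [hnil] at this
    exact absurd this (List.not_mem_nil)
  · intro p hp
    rcases (PySem.Dict.mem_items_insert m deer _ p).mp hp with hpn | ⟨hpo, _⟩
    · have hk0 : 0 ≤ m.getD deer 0 := pvGetD_nonneg m hpos deer
      rw [hpn]; exact ⟨by omega, hd⟩
    · exact hpos p hpo
  · intro p hp
    rcases (PySem.Dict.mem_items_insert m deer _ p).mp hp with hpn | ⟨hpo, _⟩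
    · rw [hpn]; omega
    · exact hbd p hpo
  · rw [if_neg (by simp)]
    refine ⟨(deer, m.getD deer 0 + 1), PySem.Dict.mem_items_insert_self m deer _,
      z, (PySem.Dict.mem_items_insert m deer _ z).mpr (Or.inr ⟨hz, hz1⟩), ?_, by omega, hzn⟩
    simpa using fun hzd => hz1 hzd.symm

lemma pvMS_low (m : PySem.Dict String Int) (n₀ : Int) (w₀ : String) (u₀ : Bool) (deer : String)
    (hms : pvMState m n₀ w₀ u₀) (hd : deer ≠ "")
    (hlt : m.getD deer 0 + 1 < n₀) :
    pvMState (m.insert deer (m.getD deer 0 + 1)) n₀ w₀ u₀ := by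
  obtain ⟨hnd, hne, hpos, hbd, hu⟩ := hms
  refine ⟨PySem.Dict.nodup_keys_insert m deer _ hnd, ?_, ?_, ?_, ?_⟩
  · intro hnil
    have := PySem.Dict.mem_items_insert_self m deer (m.getD deer 0 + 1)
    rw [hnil] at this
    exact absurd this (List.not_mem_nil)
  · intro p hp
    rcases (PySem.Dict.mem_items_insert m deer _ p).mp hp with hpn | ⟨hpo, _⟩
    · have hk0 : 0 ≤ m.getD deer 0 := pvGetD_nonneg m hpos deer
      rw [hpn]; exact ⟨by omega, hd⟩
    · exact hpos p hpo
  · intro p hp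
    rcases (PySem.Dict.mem_items_insert m deer _ p).mp hp with hpn | ⟨hpo, _⟩
    · rw [hpn]; omega
    · exact hbd p hpo
  · cases u₀ with
    | true =>
      have hut : (w₀, n₀) ∈ m.items ∧ ∀ p ∈ m.items, p.2 = n₀ → p.1 = w₀ := by simpa using hu
      rw [if_pos rfl]
      have hw0d : w₀ ≠ deer := by
        intro hwd
        have := pvKeyVal m hnd hut.1 deer hwd
        simp at this; omega
      refine ⟨(PySem.Dict.mem_items_insert m deer _ (w₀, n₀)).mpr (Or.inr ⟨hut.1, hw0d⟩), ?_⟩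
      intro p hp hpn
      rcases (PySem.Dict.mem_items_insert m deer _ p).mp hp with hpn' | ⟨hpo, _⟩
      · rw [hpn'] at hpn; simp at hpn; omega
      · exact hut.2 p hpo hpn
    | false =>
      obtain ⟨p, hp, q, hq, hpq, hpn, hqn⟩ := (by simpa using hu :
        ∃ p ∈ m.items, ∃ q ∈ m.items, p.1 ≠ q.1 ∧ p.2 = n₀ ∧ q.2 = n₀)
      have hpd : p.1 ≠ deer := fun hpd => by have := pvKeyVal m hnd hp deer hpd; omega
      have hqd : q.1 ≠ deer := fun hqd => by have := pvKeyVal m hnd hq deer hqd; omega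
      rw [if_neg (by simp)]
      exact ⟨p, (PySem.Dict.mem_items_insert m deer _ p).mpr (Or.inr ⟨hp, hpd⟩),
        q, (PySem.Dict.mem_items_insert m deer _ q).mpr (Or.inr ⟨hq, hqd⟩), hpq, hpn, hqn⟩

lemma pvStep_inv (dbb : List (String × String)) (fb : PySem.Dict String String)
    (nbc : PySem.Dict String (PySem.Dict String Int))
    (tally : PySem.Dict (String × String) Int)
    (best : PySem.Dict String (Int × String × Bool)) (row : String × String)
    (h : pvInv nbc tally best) :
    (pvStepA dbb (fb, nbc) row).1 = (pvStepB dbb (fb, tally, best) row).1 ∧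
    pvInv (pvStepA dbb (fb, nbc) row).2 (pvStepB dbb (fb, tally, best) row).2.1
      (pvStepB dbb (fb, tally, best) row).2.2 := by
  obtain ⟨hnd, ht, hrel⟩ := h
  unfold pvStepA pvStepB
  cases hlk : List.lookup row.1 dbb with
  | none => exact ⟨rfl, hnd, ht, hrel⟩
  | some deer =>
    by_cases hdeer : deer = ""
    · simp only [if_pos hdeer]
      exact ⟨trivial, hnd, ht, hrel⟩
    · simp only [if_neg hdeer]
      rw [ht row.2 deer]
      refine ⟨trivial, PySem.Dict.nodup_keys_insert nbc row.2 _ hnd, ?_, ?_⟩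
      · -- the flat tally still mirrors the nested counts
        intro c d
        rw [PySem.Dict.getD_insert, PySem.Dict.getD_insert]
        by_cases hc : c = row.2
        · subst hc
          by_cases hd2 : d = deer
          · subst hd2
            rw [if_pos rfl, if_pos rfl, PySem.Dict.getD_insert_self]
          · rw [if_neg (by simp [hd2]), if_pos rfl,
              PySem.Dict.getD_insert_of_ne _ _ _ hd2, ht row.2 d]
        · rw [if_neg (by simp [hc]), if_neg hc, ht c d]
      · -- each cluster's best-entry still describes its counts dict
        intro c'
        by_cases hc : c' = row.2
        · subst hc
          rw [PySem.Dict.get?_insert_self]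
          have hrc := hrel row.2
          cases hb : best.get? row.2 with
          | none =>
            rw [hb] at hrc
            cases hm : nbc.get? row.2 with
            | some mm => rw [hm] at hrc; simp [pvRel] at hrc
            | none =>
              have hcm : nbc.getD row.2 PySem.Dict.empty = PySem.Dict.empty := by
                rw [PySem.Dict.getD_eq_get?_getD, hm]; rfl
              rw [hcm]
              dsimp only
              rw [PySem.Dict.get?_insert_self]
              show pvMState _ _ _ _
              exact pvMS_new PySem.Dict.empty 0 deer (by simp)
                (by intro p hp; simp [PySem.Dict.empty] at hp)
                (by intro p hp; simp [PySem.Dict.empty] at hp) hdeer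
                (by rw [PySem.Dict.getD_empty]; omega)
          | some b =>
            obtain ⟨n₀, w₀, u₀⟩ := b
            rw [hb] at hrc
            cases hm : nbc.get? row.2 with
            | none => rw [hm] at hrc; simp [pvRel] at hrc
            | some m₀ =>
              rw [hm] at hrc
              have hms : pvMState m₀ n₀ w₀ u₀ := hrc
              have hcm : nbc.getD row.2 PySem.Dict.empty = m₀ := by
                rw [PySem.Dict.getD_eq_get?_getD, hm]; rfl
              rw [hcm]
              dsimp only
              by_cases hgt : m₀.getD deer 0 + 1 > n₀
              · rw [if_pos hgt, PySem.Dict.get?_insert_self]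
                show pvMState _ _ _ _
                exact pvMS_new m₀ n₀ deer hms.1 hms.2.2.1 hms.2.2.2.1 hdeer hgt
              · by_cases heq : m₀.getD deer 0 + 1 = n₀
                · rw [if_neg hgt, if_pos heq, PySem.Dict.get?_insert_self]
                  show pvMState _ _ _ _
                  have htie := pvMS_tie m₀ n₀ w₀ u₀ deer hms hdeer heq
                  rwa [← heq] at htie
                · rw [if_neg hgt, if_neg heq, hb]
                  show pvMState _ _ _ _
                  exact pvMS_low m₀ n₀ w₀ u₀ deer hms hdeer (by omega)
        · rw [PySem.Dict.get?_insert_of_ne nbc _ hc]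
          have hbest : (match best.get? row.2 with
              | none => best.insert row.2 ((nbc.getD row.2 PySem.Dict.empty).getD deer 0 + 1, deer, true)
              | some b =>
                if (nbc.getD row.2 PySem.Dict.empty).getD deer 0 + 1 > b.1 then
                  best.insert row.2 ((nbc.getD row.2 PySem.Dict.empty).getD deer 0 + 1, deer, true)
                else if (nbc.getD row.2 PySem.Dict.empty).getD deer 0 + 1 = b.1 then
                  best.insert row.2 ((nbc.getD row.2 PySem.Dict.empty).getD deer 0 + 1, b.2.1, false)
                else best).get? c' = best.get? c' := by
            cases best.get? row.2 with
            | none => exact PySem.Dict.get?_insert_of_ne best _ hc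
            | some b =>
              dsimp only
              split_ifs <;>
                first
                | exact PySem.Dict.get?_insert_of_ne best _ hc
                | rfl
          rw [hbest]
          exact hrel c'

lemma pvFold_inv (dbb : List (String × String)) :
    ∀ (rows : List (String × String)) (fb : PySem.Dict String String)
      (nbc : PySem.Dict String (PySem.Dict String Int))
      (tally : PySem.Dict (String × String) Int)
      (best : PySem.Dict String (Int × String × Bool)),
      pvInv nbc tally best →
      (rows.foldl (pvStepA dbb) (fb, nbc)).1 = (rows.foldl (pvStepB dbb) (fb, tally, best)).1 ∧
      pvInv (rows.foldl (pvStepA dbb) (fb, nbc)).2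
        (rows.foldl (pvStepB dbb) (fb, tally, best)).2.1
        (rows.foldl (pvStepB dbb) (fb, tally, best)).2.2 := by
  intro rows
  induction rows with
  | nil => intro fb nbc tally best h; exact ⟨rfl, h⟩
  | cons row rest ih =>
    intro fb nbc tally best h
    obtain ⟨h1, h2⟩ := pvStep_inv dbb fb nbc tally best row h
    simp only [List.foldl_cons]
    rcases hA : pvStepA dbb (fb, nbc) row with ⟨a1, a2⟩
    rcases hB : pvStepB dbb (fb, tally, best) row with ⟨b1, b2, b3⟩
    rw [hA, hB] at h1 h2
    simp only at h1 h2
    subst h1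
    exact ih a1 a2 b2 b3 h2

lemma pvStepCW_get?_ne (c : String) (cw : PySem.Dict String String)
    (p : String × PySem.Dict String Int) (hne : p.1 ≠ c) :
    (pvStepCW cw p).get? c = cw.get? c := by
  rw [pvStepCW_eq]
  cases pvSelA p.2 with
  | none => rfl
  | some w => exact PySem.Dict.get?_insert_of_ne cw w (Ne.symm hne)

lemma pvCW_skip (c : String) :
    ∀ (l : List (String × PySem.Dict String Int)) (cw : PySem.Dict String String),
      c ∉ l.map Prod.fst → (l.foldl pvStepCW cw).get? c = cw.get? c := by
  intro l
  induction l with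
  | nil => intro cw _; rfl
  | cons a t ih =>
    intro cw hc
    simp only [List.map_cons, List.mem_cons] at hc
    push_neg at hc
    rw [List.foldl_cons, ih _ hc.2, pvStepCW_get?_ne c cw a (fun h => hc.1 h.symm)]

lemma pvCW_get_list (c : String) :
    ∀ (l : List (String × PySem.Dict String Int)) (cw : PySem.Dict String String),
      (l.map Prod.fst).Nodup →
      (l.foldl pvStepCW cw).get? c =
        match l.find? (fun p => p.1 == c) with
        | some p => (match pvSelA p.2 with | some w => some w | none => cw.get? c)
        | none => cw.get? c := by
  intro l
  induction l with
  | nil => intro cw _; rfl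
  | cons a t ih =>
    intro cw hnd
    simp only [List.map_cons, List.nodup_cons] at hnd
    rw [List.foldl_cons]
    by_cases hac : a.1 = c
    · have hfind : (a :: t).find? (fun p => p.1 == c) = some a :=
        List.find?_cons_of_pos (by simp [hac])
      rw [hfind]
      have hskip : ((t.foldl pvStepCW (pvStepCW cw a)).get? c) = (pvStepCW cw a).get? c := by
        apply pvCW_skip
        rw [← hac]; exact hnd.1
      rw [hskip, pvStepCW_eq]
      show (match pvSelA a.2 with | some w => cw.insert a.1 w | none => cw).get? c
           = match pvSelA a.2 with | some w => some w | none => cw.get? c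
      cases pvSelA a.2 with
      | none => rfl
      | some w => rw [hac]; exact PySem.Dict.get?_insert_self cw c w
    · have hfind : (a :: t).find? (fun p => p.1 == c) = t.find? (fun p => p.1 == c) :=
        List.find?_cons_of_neg (by simp [hac])
      rw [ih _ hnd.2, pvStepCW_get?_ne c cw a hac, hfind]

lemma pvInv_empty : pvInv PySem.Dict.empty PySem.Dict.empty PySem.Dict.empty := by
  refine ⟨by simp [PySem.Dict.keys, PySem.Dict.empty], ?_, ?_⟩
  · intro c d; simp [PySem.Dict.getD_empty]
  · intro c; simp [PySem.Dict.get?_empty, pvRel]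

lemma pvCW_get (nbc : PySem.Dict String (PySem.Dict String Int)) (hnd : nbc.keys.Nodup) (c : String) :
    (nbc.items.foldl pvStepCW PySem.Dict.empty).get? c = (nbc.get? c).bind pvSelA := by
  rw [pvCW_get_list c nbc.items PySem.Dict.empty hnd]
  cases h : nbc.items.find? (fun p => p.1 == c) with
  | none => simp [PySem.Dict.get?, h, PySem.Dict.empty]
  | some p =>
    simp only [PySem.Dict.get?, h, Option.map_some, Option.bind_some]
    cases pvSelA p.2 with
    | none => exact PySem.Dict.get?_empty c
    | some w => rfl

lemma pvRel_winB (om : Option (PySem.Dict String Int)) (ob : Option (Int × String × Bool))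
    (h : pvRel om ob) : om.bind pvSelA = pvWinB ob := by
  cases om with
  | none =>
    cases ob with
    | none => rfl
    | some b => obtain ⟨n, w, u⟩ := b; simp [pvRel] at h
  | some m =>
    cases ob with
    | none => simp [pvRel] at h
    | some b =>
      obtain ⟨n, w, u⟩ := b
      have hsel := pvSelA_eq m n w u h
      cases u <;> simp [pvWinB, hsel]

lemma pvRel_ne (om : Option (PySem.Dict String Int)) (ob : Option (Int × String × Bool)) (w : String)
    (h : pvRel om ob) (hw : om.bind pvSelA = some w) : w ≠ "" := by
  cases om with
  | none => simp at hw
  | some m =>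
    cases ob with
    | none => simp [pvRel] at h
    | some b =>
      obtain ⟨n, w', u⟩ := b
      simp only [Option.bind_some] at hw
      rw [pvSelA_eq m n w' u h] at hw
      cases u with
      | false => simp at hw
      | true =>
        obtain rfl : w' = w := by simpa using hw
        obtain ⟨_, _, hpos, _, hu⟩ := h
        exact (hpos _ hu.1).2

lemma pvFinal (cw : PySem.Dict String String) (best : PySem.Dict String (Int × String × Bool))
    (hag : ∀ c, cw.get? c = pvWinB (best.get? c))
    (hne : ∀ c w, cw.get? c = some w → w ≠ "") :
    ∀ (rows : List (String × String)) (pf : PySem.Dict String String),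
      rows.foldl (pvStepPfA cw) pf = rows.foldl (pvStepPfB best) pf := by
  intro rows
  induction rows with
  | nil => intro pf; rfl
  | cons row t ih =>
    intro pf
    rw [List.foldl_cons, List.foldl_cons]
    have hbody : pvStepPfA cw pf row = pvStepPfB best pf row := by
      unfold pvStepPfA pvStepPfB
      rw [hag row.2]
      cases hb : best.get? row.2 with
      | none => rfl
      | some b =>
        obtain ⟨n, w, u⟩ := b
        cases u with
        | false => rfl
        | true =>
          have hwne : w ≠ "" := hne row.2 w (by rw [hag row.2, hb]; rfl)
          simp [pvWinB, hwne]
    rw [hbody, ih]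

-- ===== VERDICT (by name: the statement is the Claim_ definition above) =====
theorem build_cluster_suggestions_py_spec : Claim_equal_build_cluster_suggestions_py := by
  intro rows dbb _
  unfold Spec_build_cluster_suggestions_py
  rw [pvPortA_eq, pvPortB_eq]
  obtain ⟨h1, h2⟩ := pvFold_inv dbb rows PySem.Dict.empty PySem.Dict.empty
    PySem.Dict.empty PySem.Dict.empty pvInv_empty
  simp only
  have hag : ∀ c, ((rows.foldl (pvStepA dbb) (PySem.Dict.empty, PySem.Dict.empty)).2.items.foldl
      pvStepCW PySem.Dict.empty).get? c =
      pvWinB ((rows.foldl (pvStepB dbb) (PySem.Dict.empty, PySem.Dict.empty, PySem.Dict.empty)).2.2.get? c) := by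
    intro c
    rw [pvCW_get _ h2.1 c]
    exact pvRel_winB _ _ (h2.2.2 c)
  have hne : ∀ c w, ((rows.foldl (pvStepA dbb) (PySem.Dict.empty, PySem.Dict.empty)).2.items.foldl
      pvStepCW PySem.Dict.empty).get? c = some w → w ≠ "" := by
    intro c w hw
    rw [pvCW_get _ h2.1 c] at hw
    exact pvRel_ne _ _ _ (h2.2.2 c) hw
  rw [pvFinal _ _ hag hne rows PySem.Dict.empty, h1]
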